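-- pv_equiv track=rewrite | github.com/umang345/lets-python | Day-5/practice/p1.py | generate_square
-- ===== SOURCE A (Python) =====
-- def generate_square(n):
--     """
--     Function to return a square pattern of '*' of side n as a list of strings.
--
--     Parameters:
--     n (int): The size of the square.
--
--     Returns:
--     list: A list of strings where each string represents a row of the square.
--     """
--     # Your code here
--
--     result = list()
--
--     for i in range(n):
--         row = []
--         for j in range(n):
--             row.append("*")
--         result.append("".join(row))
--
--     return result
-- ===== SOURCE B (Python) =====
-- def generate_square(n):
--     return ["*" * n] * n
-- ===== Notes on version B (the rewrite author's own statement) =====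
-- stated objective: idiomatic
-- what changed: Replaces the nested append loops with a loop-free closed form: one row built by string replication and the square by list replication.
import Mathlib
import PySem

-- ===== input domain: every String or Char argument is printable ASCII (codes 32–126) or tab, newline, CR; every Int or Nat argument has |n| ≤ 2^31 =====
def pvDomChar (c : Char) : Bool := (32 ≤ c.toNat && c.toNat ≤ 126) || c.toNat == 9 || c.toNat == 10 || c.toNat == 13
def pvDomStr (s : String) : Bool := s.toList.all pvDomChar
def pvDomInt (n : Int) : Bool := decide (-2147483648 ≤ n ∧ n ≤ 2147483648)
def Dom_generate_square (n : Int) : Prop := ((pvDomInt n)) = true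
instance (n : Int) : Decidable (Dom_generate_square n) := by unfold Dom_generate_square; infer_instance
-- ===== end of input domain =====

-- B builds the square loop-free by string and list replication instead of A's nested append loops (idiomatic closed form).

-- ===== PORT A =====
def generate_square (n : Int) : List String :=
  (PySem.List.pyRange 0 n 1).foldl
    (fun result _i =>
      let row := (PySem.List.pyRange 0 n 1).foldl (fun row _j => row ++ ["*"]) ([] : List String)
      result ++ [PySem.Str.join "" row])
    []

-- ===== PORT B =====
def generate_square_alt (n : Int) : List String :=
  PySem.List.pyRepeat [String.ofList (PySem.List.pyRepeat ['*'] n)] n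

-- ===== PRECONDITION & SPEC =====
def Spec_generate_square (n : Int) (out : List String) : Prop := out = generate_square_alt n
instance (n : Int) (out : List String) : Decidable (Spec_generate_square n out) := by unfold Spec_generate_square; infer_instance

-- ===== CLAIM (what is proved, stated in full; the proofs are below) =====
def Claim_equal_generate_square : Prop := ∀ (n : Int), Dom_generate_square n → Spec_generate_square n (generate_square n)

-- ===== LEMMAS AND PROOFS =====

-- a constant-append fold produces a replicate
theorem pv_foldl_const_append {α β : Type} (l : List α) (acc : List β) (x : β) :
    l.foldl (fun a _ => a ++ [x]) acc = acc ++ List.replicate l.length x := by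
  induction l generalizing acc with
  | nil => simp
  | cons h t ih =>
      simp [List.foldl_cons, ih, List.replicate_succ]

theorem pv_join_replicate_star (k : Nat) :
    PySem.Str.join "" (List.replicate k "*") = String.ofList (List.replicate k '*') := by
  apply String.toList_injective
  have h : (List.replicate k "*").map String.toList = (List.replicate k '*').map ([·]) := by
    simp [List.map_replicate]
  rw [PySem.Str.join]
  -- reduce to the Chars form, then apply join_nil_singletons
  rw [show String.toList ("" : String) = [] from rfl, h, PySem.Chars.join_nil_singletons]

-- ===== VERDICT (by name: the statement is the Claim_ definition above) =====
theorem generate_square_spec : Claim_equal_generate_square := by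
  intro n _
  unfold Spec_generate_square generate_square generate_square_alt
  rw [pv_foldl_const_append, pv_foldl_const_append]
  simp [PySem.List.length_pyRange_one, PySem.List.pyRepeat_singleton,
    pv_join_replicate_star]
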